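-- pv_equiv track=rewrite | github.com/cafrii/omega2 | 백준/Gold/2313. 보석 구매하기/보석 구매하기.py | solve
-- ===== SOURCE A (Python) =====
-- def solve(N:int, A:list[list[int]])->list[str]:
--     '''
--     Args:
--     Returns:
--     '''
--     NINF = int(-1e8) # -(1_000*10_000 + 1)  # negative infinity
--
--     def find_max_subseq(seq:list[int])->list[int]:
--         '''
--         Returns: [ start_idx, end_idx, max_sum ]
--         '''
--         n = len(seq)
--
--         # format of dp and max_kv: [ start_idx, end_idx, max_sum ]
--         # index is 0-based.
--
--         dp = [ [k, k, v] for k,v in enumerate(seq) ]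
--         # 자기 자신 단독으로만 구성된 경우로 초기화
--         max_kv = dp[0][:]
--
--         for k in range(1, n): # k: 1 ~ n-1
--
--             if dp[k-1][2] > 0:
--                 # 직전의 수열을 이어서 하는 것이 도움이 되는 경우임. 끝 인덱스는 현재 인덱스
--                 dp[k] = [dp[k-1][0], k, dp[k-1][2] + seq[k]]
--
--             # 최대값 추척
--             if dp[k][2] < max_kv[2]: continue
--
--             if dp[k][2] > max_kv[2]:  # 새로운 최대값
--                 max_kv = dp[k][:] # (dp[k][0], k, dp[k][2])
--                 continue
--
--             # dp[k][2] == max_kv[2]:  # 동점자인 경우.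
--             # 보석 개수가 최소가 되는 것을 선택
--             if dp[k][1] - dp[k][0] > max_kv[1] - max_kv[0]:
--                 continue
--
--             if dp[k][1] - dp[k][0] < max_kv[1] - max_kv[0]:
--                 max_kv = dp[k][:]
--
--             # dp[k][1] - dp[k][0] == max_kv[1] - max_kv[0]:
--             # 여전히 동점자. 사전식, 즉, 먼저 발견된 것 우선. 따라서 갱신 없이 skip
--             pass
--
--         return max_kv
--
--     ans = ['']
--     max_sum = 0
--     for i in range(N):
--         s,e,mx = find_max_subseq(A[i])
--         max_sum += mx
--         ans.append(f'{s+1} {e+1}')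
--     ans[0] = str(max_sum)
--     return ans
-- ===== SOURCE B (Python) =====
-- def solve(N: int, A: list[list[int]]) -> list[str]:
--     # Prefix-sum scan: for each row track the minimum prefix (preferring the later
--     # index on ties) instead of building a DP table.
--     ans = ['']
--     total = 0
--     for i in range(N):
--         seq = A[i]
--         P = 0            # running prefix sum
--         minP, istar = 0, 0
--         best = None      # (start, end, sum)
--         for j, v in enumerate(seq):
--             P += v
--             cs, ce, csum = istar, j, P - minP
--             if best is None or csum > best[2] or (csum == best[2] and ce - cs < best[1] - best[0]):
--                 best = (cs, ce, csum)
--             if P <= minP: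
--                 minP, istar = P, j + 1
--         s, e, mx = best
--         total += mx
--         ans.append(f'{s+1} {e+1}')
--     ans[0] = str(total)
--     return ans
-- ===== Notes on version B (the rewrite author's own statement) =====
-- stated objective: faster
-- what changed: Per row, replaces the DP table (dp[k] = best subarray ending at k, built with list writes and slice copies) by a single prefix-sum scan that keeps only the running sum, the minimum prefix value (preferring the later index on ties) and the current best triple.
import Mathlib
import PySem

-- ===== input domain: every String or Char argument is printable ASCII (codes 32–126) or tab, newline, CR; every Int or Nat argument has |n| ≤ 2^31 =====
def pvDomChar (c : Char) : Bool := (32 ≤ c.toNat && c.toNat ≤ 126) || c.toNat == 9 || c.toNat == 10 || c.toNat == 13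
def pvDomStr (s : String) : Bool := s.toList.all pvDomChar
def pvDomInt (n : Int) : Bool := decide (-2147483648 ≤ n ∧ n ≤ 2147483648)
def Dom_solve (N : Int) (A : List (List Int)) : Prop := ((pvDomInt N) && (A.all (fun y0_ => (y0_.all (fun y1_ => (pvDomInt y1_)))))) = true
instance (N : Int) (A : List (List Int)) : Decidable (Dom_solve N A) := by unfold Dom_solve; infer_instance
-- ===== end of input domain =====

-- B replaces A's per-row DP table by a constant-space prefix-sum scan (measured faster by a
-- constant factor); equal return values are proved on Pre_ (rows used must exist and be nonempty,
-- exactly where the Python A returns instead of raising IndexError).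

-- ===== PORT A =====
-- One loop step of find_max_subseq: state = (dp list, max_kv).
def pvStepA (seq : List Int) (st : List (Int × Int × Int) × (Int × Int × Int)) (k : Int) :
    List (Int × Int × Int) × (Int × Int × Int) :=
  let prev := PySem.List.pyGetD st.1 (k - 1) (0, 0, 0)
  let dp := if prev.2.2 > 0 then
      PySem.List.pySetD st.1 k (prev.1, k, prev.2.2 + PySem.List.pyGetD seq k 0)
    else st.1
  let dpk := PySem.List.pyGetD dp k (0, 0, 0)
  if dpk.2.2 < st.2.2.2 then (dp, st.2)
  else if dpk.2.2 > st.2.2.2 then (dp, dpk)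
  else if dpk.2.1 - dpk.1 > st.2.2.1 - st.2.1 then (dp, st.2)
  else if dpk.2.1 - dpk.1 < st.2.2.1 - st.2.1 then (dp, dpk)
  else (dp, st.2)

-- find_max_subseq; Python raises IndexError on an empty seq (dp[0]) — the default (0,0,0) is
-- only reached outside Pre_.
def pvFindMaxA (seq : List Int) : Int × Int × Int :=
  let n : Int := (seq.length : Int)
  let dp0 : List (Int × Int × Int) := (PySem.List.enumerate seq 0).map (fun kv => (kv.1, kv.1, kv.2))
  let mkv0 := PySem.List.pyGetD dp0 0 (0, 0, 0)
  ((PySem.List.pyRange 1 n 1).foldl (pvStepA seq) (dp0, mkv0)).2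

def solve (N : Int) (A : List (List Int)) : List String :=
  let st := (PySem.List.pyRange 0 N 1).foldl
    (fun (st : List String × Int) i =>
      let r := pvFindMaxA (PySem.List.pyGetD A i [])
      (st.1 ++ [PySem.Int.toStr (r.1 + 1) ++ " " ++ PySem.Int.toStr (r.2.1 + 1)], st.2 + r.2.2))
    ([""], 0)
  PySem.List.pySetD st.1 0 (PySem.Int.toStr st.2)

-- ===== PORT B =====
-- One loop step of B's prefix scan: state = (P, minP, istar, best).
def pvStepB (st : Int × Int × Int × Option (Int × Int × Int)) (jv : Int × Int) :
    Int × Int × Int × Option (Int × Int × Int) :=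
  let P := st.1 + jv.2
  let cand : Int × Int × Int := (st.2.2.1, jv.1, P - st.2.1)
  let best := match st.2.2.2 with
    | none => some cand
    | some b =>
        if cand.2.2 > b.2.2 ∨ (cand.2.2 = b.2.2 ∧ cand.2.1 - cand.1 < b.2.1 - b.1)
        then some cand else some b
  if P ≤ st.2.1 then (P, P, jv.1 + 1, best) else (P, st.2.1, st.2.2.1, best)

def pvBestRowB (seq : List Int) : Option (Int × Int × Int) :=
  ((PySem.List.enumerate seq 0).foldl pvStepB (0, 0, 0, none)).2.2.2

def solve_alt (N : Int) (A : List (List Int)) : List String :=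
  let st := (PySem.List.pyRange 0 N 1).foldl
    (fun (st : List String × Int) i =>
      -- Python B raises on an empty row (unpacking None); the none branch is outside Pre_.
      match pvBestRowB (PySem.List.pyGetD A i []) with
      | some r => (st.1 ++ [PySem.Int.toStr (r.1 + 1) ++ " " ++ PySem.Int.toStr (r.2.1 + 1)], st.2 + r.2.2)
      | none => st)
    ([""], 0)
  PySem.List.pySetD st.1 0 (PySem.Int.toStr st.2)

-- ===== PRECONDITION & SPEC =====
-- Pre_ = exactly the inputs where Python A returns: every row index 0..N-1 exists and each
-- of those rows is nonempty (otherwise A raises IndexError).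
def Pre_solve (N : Int) (A : List (List Int)) : Prop :=
  N ≤ (A.length : Int) ∧ ∀ r ∈ A.take N.toNat, r ≠ []
instance (N : Int) (A : List (List Int)) : Decidable (Pre_solve N A) := by
  unfold Pre_solve; infer_instance

def pvWitness_solve : Int × List (List Int) := (2, [[1, -2, 3], [2]])

def Spec_solve (N : Int) (A : List (List Int)) (out : List String) : Prop := out = solve_alt N A
instance (N : Int) (A : List (List Int)) (out : List String) : Decidable (Spec_solve N A out) := by
  unfold Spec_solve; infer_instance

-- ===== CLAIM (what is proved, stated in full; the proofs are below) =====
def Claim_equal_solve : Prop :=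
  ∀ (N : Int) (A : List (List Int)), Dom_solve N A → Pre_solve N A → Spec_solve N A (solve N A)

-- ===== LEMMAS AND PROOFS =====

-- dp[k] of A's DP (entries never written keep their initial value (k, k, seq[k])).
def pvKd (seq : List Int) : Nat → Int × Int × Int
  | 0 => (0, 0, seq.getD 0 0)
  | k + 1 =>
    let p := pvKd seq k
    if p.2.2 > 0 then (p.1, (k : Int) + 1, p.2.2 + seq.getD (k + 1) 0)
    else ((k : Int) + 1, (k : Int) + 1, seq.getD (k + 1) 0)

-- (start, sum) of the run to be extended into position k+1.
def pvGp (seq : List Int) (k : Nat) : Int × Int :=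
  if (pvKd seq k).2.2 > 0 then ((pvKd seq k).1, (pvKd seq k).2.2) else ((k : Int) + 1, 0)

-- A's tie-breaking maximum update.
def pvUpd (m c : Int × Int × Int) : Int × Int × Int :=
  if c.2.2 < m.2.2 then m
  else if c.2.2 > m.2.2 then c
  else if c.2.1 - c.1 > m.2.1 - m.1 then m
  else if c.2.1 - c.1 < m.2.1 - m.1 then c
  else m

-- best of dp[0..k] under A's tie rules.
def pvBst (seq : List Int) : Nat → Int × Int × Int
  | 0 => pvKd seq 0
  | k + 1 => pvUpd (pvBst seq k) (pvKd seq (k + 1))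

-- the dp list after the writes for indices < m.
def pvDpIdeal (seq : List Int) (m : Nat) : List (Int × Int × Int) :=
  (List.range seq.length).map
    (fun j => if j < m then pvKd seq j else ((j : Int), (j : Int), seq.getD j 0))

-- prefix sum of the first j elements.
def pvS (seq : List Int) (j : Nat) : Int :=
  ((List.range j).map (fun k => seq.getD k 0)).sum

lemma pvUpd_eq (m c : Int × Int × Int) :
    (if c.2.2 > m.2.2 ∨ (c.2.2 = m.2.2 ∧ c.2.1 - c.1 < m.2.1 - m.1) then c else m) = pvUpd m c := by
  unfold pvUpd
  split_ifs <;> first | rfl | omega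

lemma pvKd_succ_gp (seq : List Int) (k : Nat) :
    pvKd seq (k + 1) = ((pvGp seq k).1, (k : Int) + 1, (pvGp seq k).2 + seq.getD (k + 1) 0) := by
  by_cases h : (pvKd seq k).2.2 > 0
  · simp [pvKd, pvGp, h]
  · simp [pvKd, pvGp, h]

lemma pvDpIdeal_getD (seq : List Int) (m j : Nat) (d : Int × Int × Int) (h : j < seq.length) :
    (pvDpIdeal seq m).getD j d =
      if j < m then pvKd seq j else ((j : Int), (j : Int), seq.getD j 0) := by
  unfold pvDpIdeal
  rw [List.getD_eq_getElem?_getD]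
  simp [h]

lemma pvDpIdeal_succ_set (seq : List Int) (m : Nat) (_h : m < seq.length)
    (hpos : (pvKd seq m).2.2 > 0) :
    (pvDpIdeal seq (m + 1)).set (m + 1)
      ((pvKd seq m).1, (m : Int) + 1, (pvKd seq m).2.2 + seq.getD (m + 1) 0) =
    pvDpIdeal seq (m + 2) := by
  unfold pvDpIdeal
  apply List.ext_getElem
  · simp
  · intro j h1 h2
    simp only [List.getElem_set, List.getElem_map, List.getElem_range]
    by_cases hj : j = m + 1
    · subst hj
      simp [pvKd, hpos]
    · simp only [if_neg (fun hh => hj hh.symm : ¬ m + 1 = j)]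
      by_cases hlt : j < m + 1
      · simp [hlt, (show j < m + 2 by omega)]
      · simp [hlt, (show ¬ j < m + 2 by omega)]

lemma pvDpIdeal_succ_id (seq : List Int) (m : Nat)
    (hpos : ¬ (pvKd seq m).2.2 > 0) :
    pvDpIdeal seq (m + 2) = pvDpIdeal seq (m + 1) := by
  unfold pvDpIdeal
  apply List.ext_getElem
  · simp
  · intro j h1 h2
    simp only [List.getElem_map, List.getElem_range]
    by_cases hj : j = m + 1
    · subst hj
      simp only [if_pos (by omega : m + 1 < m + 2), if_neg (by omega : ¬ m + 1 < m + 1)]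
      simp [pvKd, hpos]
    · by_cases hlt : j < m + 1
      · simp [hlt, (show j < m + 2 by omega)]
      · simp [hlt, (show ¬ j < m + 2 by omega)]

lemma pvStepA_at (seq : List Int) (m : Nat) (hm : m + 1 < seq.length) (mkv : Int × Int × Int) :
    pvStepA seq (pvDpIdeal seq (m + 1), mkv) ((m : Int) + 1) =
      (pvDpIdeal seq (m + 2), pvUpd mkv (pvKd seq (m + 1))) := by
  simp only [pvStepA]
  have hidx : ((m : Int) + 1) - 1 = ((m : Nat) : Int) := by ring
  have hcast : ((m : Int) + 1) = (((m + 1 : Nat) : Int)) := by push_cast; ring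
  rw [hidx, hcast]
  simp only [PySem.List.pyGetD_natCast, PySem.List.pySetD_natCast]
  rw [pvDpIdeal_getD seq (m + 1) m _ (by omega)]
  simp only [if_pos (by omega : m < m + 1)]
  by_cases hpos : (pvKd seq m).2.2 > 0
  · rw [if_pos hpos]
    have hset : (pvDpIdeal seq (m + 1)).set (m + 1)
        ((pvKd seq m).1, ((m + 1 : Nat) : Int), (pvKd seq m).2.2 + seq.getD (m + 1) 0) =
        pvDpIdeal seq (m + 2) := by
      have h2 := pvDpIdeal_succ_set seq m (by omega) hpos
      rw [← h2]
      norm_num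
    rw [hset]
    rw [pvDpIdeal_getD seq (m + 2) (m + 1) _ (by omega)]
    simp only [if_pos (by omega : m + 1 < m + 2)]
    unfold pvUpd
    split_ifs <;> rfl
  · rw [if_neg hpos]
    rw [pvDpIdeal_succ_id seq m hpos]
    have hGD : (pvDpIdeal seq (m + 1)).getD (m + 1) (0, 0, 0) = pvKd seq (m + 1) := by
      rw [pvDpIdeal_getD seq (m + 1) (m + 1) _ (by omega)]
      simp [pvKd, hpos]
    rw [hGD]
    unfold pvUpd
    split_ifs <;> rfl

lemma pvFoldA (seq : List Int) (hne : seq ≠ []) (m : Nat) (hm : m < seq.length) :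
    (PySem.List.pyRange 1 ((m + 1 : Nat) : Int) 1).foldl (pvStepA seq)
      ((PySem.List.enumerate seq 0).map (fun kv => (kv.1, kv.1, kv.2)),
       PySem.List.pyGetD ((PySem.List.enumerate seq 0).map (fun kv => (kv.1, kv.1, kv.2))) 0 (0, 0, 0)) =
    (pvDpIdeal seq (m + 1), pvBst seq m) := by
  have hlen : 0 < seq.length := List.length_pos_of_ne_nil hne
  have hdp0 : (PySem.List.enumerate seq 0).map (fun kv => (kv.1, kv.1, kv.2)) = pvDpIdeal seq 1 := by
    apply List.ext_getElem
    · simp [pvDpIdeal, PySem.List.length_enumerate]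
    · intro j h1 h2
      simp only [List.getElem_map, PySem.List.getElem_enumerate, pvDpIdeal, List.getElem_range]
      have hj2 : j < seq.length := by
        simpa [pvDpIdeal] using h2
      by_cases hj : j = 0
      · subst hj
        simp [pvKd, List.getElem?_eq_getElem hj2]
      · simp [(show ¬ j < 1 by omega), List.getElem?_eq_getElem hj2]
  have hmkv0 : PySem.List.pyGetD (pvDpIdeal seq 1) 0 (0, 0, 0)
      = pvBst seq 0 := by
    have h0 : (0 : Int) = ((0 : Nat) : Int) := by norm_num
    rw [h0, PySem.List.pyGetD_natCast]
    rw [pvDpIdeal_getD seq 1 0 _ hlen]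
    simp [pvBst]
  rw [hdp0, hmkv0]
  clear hdp0 hmkv0
  revert hm
  induction m with
  | zero =>
    intro hm
    rw [show (((0 + 1 : Nat) : Int)) = 1 by norm_num]
    rw [PySem.List.pyRange_one_eq_nil (by norm_num)]
    rfl
  | succ k ih =>
    intro hm
    have hk : k < seq.length := by omega
    have hsplit : PySem.List.pyRange 1 ((k + 2 : Nat) : Int) 1 =
        PySem.List.pyRange 1 ((k + 1 : Nat) : Int) 1 ++ [((k + 1 : Nat) : Int)] := by
      have : ((k + 2 : Nat) : Int) = ((k + 1 : Nat) : Int) + 1 := by push_cast; ring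
      rw [this, PySem.List.pyRange_one_succ_right (by push_cast; omega)]
    rw [hsplit, List.foldl_append, ih hk]

    simp only [List.foldl_cons, List.foldl_nil]
    have : ((k + 1 : Nat) : Int) = ((k : Nat) : Int) + 1 := by push_cast; ring
    rw [this, pvStepA_at seq k (by omega) (pvBst seq k)]
    rfl

lemma pvFindMaxA_eq_bst (seq : List Int) (hne : seq ≠ []) :
    pvFindMaxA seq = pvBst seq (seq.length - 1) := by
  have hlen : 0 < seq.length := List.length_pos_of_ne_nil hne
  simp only [pvFindMaxA]
  have hcast : ((seq.length : Nat) : Int) = (((seq.length - 1) + 1 : Nat) : Int) := by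
    push_cast [Nat.sub_add_cancel hlen]; ring
  rw [hcast, pvFoldA seq hne (seq.length - 1) (by omega)]

lemma pvS_succ (seq : List Int) (j : Nat) : pvS seq (j + 1) = pvS seq j + seq.getD j 0 := by
  unfold pvS
  rw [List.range_succ, List.map_append, List.sum_append]
  simp

lemma pvStepB_at (seq : List Int) (j : Nat) :
    pvStepB (pvS seq (j + 1), pvS seq (j + 1) - (pvGp seq j).2, (pvGp seq j).1, some (pvBst seq j))
      (((j + 1 : Nat) : Int), seq.getD (j + 1) 0) =
    (pvS seq (j + 2), pvS seq (j + 2) - (pvGp seq (j + 1)).2, (pvGp seq (j + 1)).1,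
      some (pvBst seq (j + 1))) := by
  have hkd := pvKd_succ_gp seq j
  have hP : pvS seq (j + 1) + seq.getD (j + 1) 0 = pvS seq (j + 2) := (pvS_succ seq (j + 1)).symm
  simp only [pvStepB]
  rw [hP]
  have e1 : (pvGp seq j).1 = (pvKd seq (j + 1)).1 := by rw [hkd]
  have e2 : ((j + 1 : Nat) : Int) = (pvKd seq (j + 1)).2.1 := by rw [hkd]; push_cast; ring
  have e3 : pvS seq (j + 2) - (pvS seq (j + 1) - (pvGp seq j).2) = (pvKd seq (j + 1)).2.2 := by
    rw [hkd, ← hP]; simp; ring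
  rw [e3, e2, e1]
  have heta : ((pvKd seq (j + 1)).1, (pvKd seq (j + 1)).2.1, (pvKd seq (j + 1)).2.2) =
      pvKd seq (j + 1) := by simp
  rw [heta]
  have hbest : (if (pvKd seq (j + 1)).2.2 > (pvBst seq j).2.2 ∨
        ((pvKd seq (j + 1)).2.2 = (pvBst seq j).2.2 ∧
          (pvKd seq (j + 1)).2.1 - (pvKd seq (j + 1)).1 < (pvBst seq j).2.1 - (pvBst seq j).1)
      then some (pvKd seq (j + 1)) else some (pvBst seq j)) = some (pvBst seq (j + 1)) := by
    rw [show pvBst seq (j + 1) = pvUpd (pvBst seq j) (pvKd seq (j + 1)) from rfl]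
    rw [← pvUpd_eq]
    exact (apply_ite some _ _ _).symm
  rw [hbest]
  by_cases hc : (pvKd seq (j + 1)).2.2 > 0
  · rw [if_neg (show ¬ pvS seq (j + 2) ≤ pvS seq (j + 1) - (pvGp seq j).2 by omega)]
    have hgp : pvGp seq (j + 1) = ((pvKd seq (j + 1)).1, (pvKd seq (j + 1)).2.2) := by
      unfold pvGp; rw [if_pos hc]
    rw [hgp]
    rw [show pvS seq (j + 2) - (pvKd seq (j + 1)).2.2 = pvS seq (j + 1) - (pvGp seq j).2 by omega]
  · rw [if_pos (show pvS seq (j + 2) ≤ pvS seq (j + 1) - (pvGp seq j).2 by omega)]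
    have hgp : pvGp seq (j + 1) = (((j + 1 : Nat) : Int) + 1, 0) := by
      unfold pvGp; rw [if_neg hc]
    rw [← e2, hgp]
    rw [show pvS seq (j + 2) - (0 : Int) = pvS seq (j + 2) by ring]

lemma pvFoldB (seq : List Int) (j : Nat) (hj : j < seq.length) :
    (PySem.List.pyRange 0 ((j + 1 : Nat) : Int) 1).foldl
      (fun st i => pvStepB st (i, PySem.List.pyGetD seq i 0)) (0, 0, 0, none) =
    (pvS seq (j + 1), pvS seq (j + 1) - (pvGp seq j).2, (pvGp seq j).1, some (pvBst seq j)) := by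
  revert hj
  induction j with
  | zero =>
    intro hj
    rw [show (((0 + 1 : Nat) : Int)) = 0 + 1 by norm_num, PySem.List.pyRange_one_singleton]
    simp only [List.foldl_cons, List.foldl_nil, pvStepB]
    rw [PySem.List.pyGetD_zero]
    have hS : pvS seq 1 = 0 + seq.getD 0 0 := by simp [pvS]
    have hbst : pvBst seq 0 = ((0 : Int), 0, seq.getD 0 0) := by
      simp [pvBst, pvKd]
    by_cases hc : 0 + seq.getD 0 0 ≤ 0
    · rw [if_pos hc]
      have hgp : pvGp seq 0 = ((0 : Int) + 1, 0) := by
        unfold pvGp pvKd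
        rw [if_neg (by simpa using hc)]
        norm_num
      rw [hgp, hbst, hS]
      rw [show (0 : Int) + seq.getD 0 0 - 0 = seq.getD 0 0 by ring]
      rw [show (0 : Int) + seq.getD 0 0 = seq.getD 0 0 by ring]
    · rw [if_neg hc]
      have hgp : pvGp seq 0 = (0, seq.getD 0 0) := by
        unfold pvGp pvKd
        rw [if_pos (by simpa using hc)]
      rw [hgp, hbst, hS]
      rw [show (0 : Int) + seq.getD 0 0 - 0 = seq.getD 0 0 by ring]
      rw [show (0 : Int) + seq.getD 0 0 - seq.getD 0 0 = 0 by ring]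
  | succ k ih =>
    intro hj
    have hsplit : PySem.List.pyRange 0 ((k + 2 : Nat) : Int) 1 =
        PySem.List.pyRange 0 ((k + 1 : Nat) : Int) 1 ++ [((k + 1 : Nat) : Int)] := by
      have hc2 : ((k + 2 : Nat) : Int) = ((k + 1 : Nat) : Int) + 1 := by push_cast; ring
      rw [hc2, PySem.List.pyRange_one_succ_right (by push_cast; omega)]
    rw [hsplit, List.foldl_append, ih (by omega)]
    simp only [List.foldl_cons, List.foldl_nil]
    rw [PySem.List.pyGetD_natCast]
    exact pvStepB_at seq k

lemma pvBestRowB_eq (seq : List Int) (hne : seq ≠ []) :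
    pvBestRowB seq = some (pvFindMaxA seq) := by
  have hlen : 0 < seq.length := List.length_pos_of_ne_nil hne
  rw [pvFindMaxA_eq_bst seq hne]
  unfold pvBestRowB
  rw [PySem.List.enumerate_eq_map_pyRange (d := 0), List.foldl_map]
  simp only [PySem.List.len_eq]
  have hcast : ((seq.length : Nat) : Int) = (((seq.length - 1) + 1 : Nat) : Int) := by
    push_cast [Nat.sub_add_cancel hlen]; ring
  rw [hcast, pvFoldB seq (seq.length - 1) (by omega)]

-- ===== VERDICT (by name: the statement is the Claim_ definition above) =====
theorem solve_spec : Claim_equal_solve := by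
  unfold Claim_equal_solve
  intro N A hdom hpre
  unfold Spec_solve
  obtain ⟨hN, hrows⟩ := hpre
  simp only [solve, solve_alt]
  have hfold : (PySem.List.pyRange 0 N 1).foldl
      (fun (st : List String × Int) i =>
        let r := pvFindMaxA (PySem.List.pyGetD A i [])
        (st.1 ++ [PySem.Int.toStr (r.1 + 1) ++ " " ++ PySem.Int.toStr (r.2.1 + 1)], st.2 + r.2.2))
      ([""], 0) =
    (PySem.List.pyRange 0 N 1).foldl
      (fun (st : List String × Int) i =>
        match pvBestRowB (PySem.List.pyGetD A i []) with
        | some r => (st.1 ++ [PySem.Int.toStr (r.1 + 1) ++ " " ++ PySem.Int.toStr (r.2.1 + 1)], st.2 + r.2.2)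
        | none => st)
      ([""], 0) := by
    apply PySem.List.foldl_congr_mem
    intro st i hi
    have hmem := (PySem.List.mem_pyRange_one).1 hi
    have h0 : 0 ≤ i := hmem.1
    have h1 : i < N := hmem.2
    have h2 : i.toNat < A.length := by omega
    have hrow : PySem.List.pyGetD A i [] = A[i.toNat] :=
      PySem.List.pyGetD_eq_getElem A [] h0 (by omega)
    have htake : A[i.toNat] ∈ A.take N.toNat := by
      have hlt : i.toNat < (A.take N.toNat).length := by
        simp [List.length_take]; omega
      have hg := List.getElem_mem hlt
      rwa [List.getElem_take] at hg
    have hne : A[i.toNat] ≠ [] := hrows _ htake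
    rw [hrow, pvBestRowB_eq _ hne]
  rw [hfold]
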